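-- pv_equiv track=rewrite | github.com/MarkHumphries1988/Katas | src/get_distinct_letters/get_distinct_letters.py | get_distinct_letters
-- ===== SOURCE A (Python) =====
-- def get_distinct_letters(word1,word2):
-- 	endstr=""
--
-- 	for letter in word1:
-- 		if len(word2.replace(letter,""))==len(word2):
-- 			endstr+=letter
--
-- 	for letter in word2:
-- 		if len(word1.replace(letter,""))==len(word1):
-- 			endstr+=letter
--
--
--
-- 	endstr="".join(sorted(endstr))
--
-- 	return endstr
-- 	pass
-- ===== SOURCE B (Python) =====
-- def get_distinct_letters(word1, word2):
--     c1 = {}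
--     for ch in word1:
--         c1[ch] = c1.get(ch, 0) + 1
--     c2 = {}
--     for ch in word2:
--         c2[ch] = c2.get(ch, 0) + 1
--     chars = []
--     for ch, n in c1.items():
--         if ch not in c2:
--             chars.extend(ch * n)
--     for ch, n in c2.items():
--         if ch not in c1:
--             chars.extend(ch * n)
--     return "".join(sorted(chars))
-- ===== Notes on version B (the rewrite author's own statement) =====
-- stated objective: faster
-- what changed: Replaces A's per-letter scan that rebuilds word.replace(letter,'') (an O(len) pass per character) with two frequency tables built once; distinct letters are tested by one dict lookup and expanded by their counts.
import Mathlib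
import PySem

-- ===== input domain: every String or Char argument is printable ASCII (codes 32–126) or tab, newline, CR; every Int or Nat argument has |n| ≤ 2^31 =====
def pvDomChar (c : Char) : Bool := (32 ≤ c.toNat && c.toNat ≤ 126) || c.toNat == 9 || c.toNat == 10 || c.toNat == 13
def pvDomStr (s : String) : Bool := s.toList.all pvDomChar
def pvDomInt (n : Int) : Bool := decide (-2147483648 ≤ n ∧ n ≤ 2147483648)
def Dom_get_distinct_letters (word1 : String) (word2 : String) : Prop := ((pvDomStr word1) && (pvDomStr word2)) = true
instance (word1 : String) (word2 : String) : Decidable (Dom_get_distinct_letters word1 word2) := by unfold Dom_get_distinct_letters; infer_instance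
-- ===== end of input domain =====

-- B replaces A's per-letter replace-and-compare-lengths scan by two frequency dictionaries
-- built once, a dict-membership test per DISTINCT letter and count expansion (objective: faster).

-- ===== PORT A =====
def get_distinct_letters (word1 : String) (word2 : String) : String :=
  -- endstr = ""; for letter in word1: if len(word2.replace(letter,"")) == len(word2): endstr += letter
  let endstr : List Char := word1.toList.foldl (fun acc letter =>
    if PySem.Str.len (PySem.Str.replace word2 (String.singleton letter) "") = PySem.Str.len word2
    then acc ++ [letter] else acc) []
  -- for letter in word2: if len(word1.replace(letter,"")) == len(word1): endstr += letter
  let endstr : List Char := word2.toList.foldl (fun acc letter =>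
    if PySem.Str.len (PySem.Str.replace word1 (String.singleton letter) "") = PySem.Str.len word1
    then acc ++ [letter] else acc) endstr
  -- endstr = "".join(sorted(endstr))
  String.mk (PySem.List.sorted endstr (fun x => x) false)

-- ===== PORT B =====
def get_distinct_letters_alt (word1 : String) (word2 : String) : String :=
  -- c1 = {}; for ch in word1: c1[ch] = c1.get(ch, 0) + 1   (likewise c2)
  let c1 : PySem.Dict Char Int := word1.toList.foldl (fun d ch => d.modify ch 0 (· + 1)) PySem.Dict.empty
  let c2 : PySem.Dict Char Int := word2.toList.foldl (fun d ch => d.modify ch 0 (· + 1)) PySem.Dict.empty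
  -- chars = []; for ch, n in c1.items(): if ch not in c2: chars.extend(ch * n)
  let chars : List Char := c1.items.foldl (fun acc p =>
    if c2.contains p.1 then acc else acc ++ List.replicate p.2.toNat p.1) []
  -- for ch, n in c2.items(): if ch not in c1: chars.extend(ch * n)
  let chars : List Char := c2.items.foldl (fun acc p =>
    if c1.contains p.1 then acc else acc ++ List.replicate p.2.toNat p.1) chars
  -- return "".join(sorted(chars))
  String.mk (PySem.List.sorted chars (fun x => x) false)

-- ===== PRECONDITION & SPEC =====
def Spec_get_distinct_letters (word1 : String) (word2 : String) (out : String) : Prop := out = get_distinct_letters_alt word1 word2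
instance (word1 : String) (word2 : String) (out : String) : Decidable (Spec_get_distinct_letters word1 word2 out) := by unfold Spec_get_distinct_letters; infer_instance

-- ===== CLAIM (what is proved, stated in full; the proofs are below) =====
def Claim_equal_get_distinct_letters : Prop := ∀ (word1 : String) (word2 : String), Dom_get_distinct_letters word1 word2 → Spec_get_distinct_letters word1 word2 (get_distinct_letters word1 word2)

-- ===== LEMMAS AND PROOFS =====

-- replace.go with a single-char pattern and empty replacement filters that char out
theorem pv_replace_go_single (c : Char) : ∀ (fuel : Nat) (l acc : List Char), l.length ≤ fuel →
    PySem.Chars.replace.go [c] [] fuel l acc = acc.reverse ++ l.filter (fun x => x ≠ c) := by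
  intro fuel
  induction fuel with
  | zero => intro l acc h; cases l with
    | nil => simp [PySem.Chars.replace.go]
    | cons a t => simp at h
  | succ n ih =>
    intro l acc h
    cases l with
    | nil => simp [PySem.Chars.replace.go]
    | cons a t =>
      by_cases hac : a = c
      · subst hac
        have : [a].isPrefixOf (a :: t) = true := by simp [List.isPrefixOf]
        simp only [PySem.Chars.replace.go, this, if_pos]
        rw [show List.drop [a].length (a :: t) = t by simp,
            show ([] : List Char).reverse ++ acc = acc by simp,
            ih t acc (by simpa using Nat.le_of_succ_le_succ h)]
        simp
      · have : [c].isPrefixOf (a :: t) = false := by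
          simp [List.isPrefixOf]; exact fun h' => hac h'.symm
        simp only [PySem.Chars.replace.go, this]
        rw [if_neg (by simp)]
        rw [ih t (a :: acc) (by simpa using Nat.le_of_succ_le_succ h)]
        simp [hac]

theorem pv_replace_single (s : List Char) (c : Char) :
    PySem.Chars.replace s [c] [] = s.filter (fun x => x ≠ c) := by
  unfold PySem.Chars.replace
  simp only [List.isEmpty_cons]
  exact pv_replace_go_single c s.length s [] le_rfl

-- A's test "len(w.replace(letter,'')) == len(w)" says: letter does not occur in w
theorem pv_cond_iff (w : String) (x : Char) :
    ((PySem.Chars.replace w.toList [x] []).length = w.length) ↔ x ∉ w.toList := by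
  have hlen : w.toList.length = w.length := by simp
  rw [pv_replace_single]
  constructor
  · intro h hm
    have hlt : (w.toList.filter (fun y => y ≠ x)).length < w.toList.length := by
      apply List.length_filter_lt_length_iff_exists.mpr
      exact ⟨x, hm, by simp⟩
    omega
  · intro h
    have hself : w.toList.filter (fun y => y ≠ x) = w.toList := by
      apply List.filter_eq_self.mpr
      intro a ha
      simp
      exact fun h' => h (h' ▸ ha)
    rw [hself, hlen]

theorem pv_cond_str (w : String) (x : Char) :
    decide (PySem.Str.len (PySem.Str.replace w (String.singleton x) "") = PySem.Str.len w)
      = decide (x ∉ w.toList) := by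
  rw [decide_eq_decide]
  have ht : (PySem.Str.replace w (String.singleton x) "").toList
      = PySem.Chars.replace w.toList [x] [] := by
    rw [PySem.Str.toList_replace]
    simp [String.singleton]
  rw [PySem.Str.len_eq, PySem.Str.len_eq, ht, Nat.cast_inj]
  rw [show (String.toList w).length = w.length from by simp]
  exact pv_cond_iff w x

-- A's append-if loop is a filter
theorem pv_foldl_filter (q : Char → Prop) [DecidablePred q] (l : List Char) (init : List Char) :
    l.foldl (fun acc letter => if q letter then acc ++ [letter] else acc) init
      = init ++ l.filter (fun x => decide (q x)) := by
  induction l generalizing init with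
  | nil => simp
  | cons a t ih =>
    simp only [List.foldl_cons, List.filter_cons]
    by_cases hq : q a
    · rw [if_pos hq, ih]; simp [hq]
    · rw [if_neg hq, ih]; simp [hq]

-- B's extend-if loop over pairs flattens blocks
theorem pv_foldl_blocks (f : Char × Int → List Char) (q : Char × Int → Bool) (l : List (Char × Int)) (init : List Char) :
    l.foldl (fun acc p => if q p then acc else acc ++ f p) init
      = init ++ l.flatMap (fun p => if q p then [] else f p) := by
  induction l generalizing init with
  | nil => simp
  | cons a t ih =>
    simp only [List.foldl_cons, List.flatMap_cons]
    by_cases hq : q a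
    · rw [if_pos hq, ih]; simp [hq]
    · rw [if_neg hq, ih]; simp [hq]

-- grouping by distinct keys with multiplicities is a permutation of the original list
theorem pv_perm_flatMap_replicate (ks : List Char) (l : List Char)
    (hnd : ks.Nodup) (hsub : ∀ x ∈ l, x ∈ ks) :
    (ks.flatMap (fun k => List.replicate (l.count k) k)).Perm l := by
  induction ks generalizing l with
  | nil =>
    have : l = [] := by
      cases l with
      | nil => rfl
      | cons a t => exact absurd (hsub a (by simp)) (by simp)
    simp [this]
  | cons k ks' ih =>
    have hnd' : ks'.Nodup := hnd.of_cons
    have hk : k ∉ ks' := by simpa using (List.nodup_cons.mp hnd).1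
    simp only [List.flatMap_cons]
    have hrep : List.replicate (l.count k) k = l.filter (fun x => decide (x = k)) :=
      (List.filter_eq k).symm
    have hcong : ks'.flatMap (fun k' => List.replicate (l.count k') k')
        = ks'.flatMap (fun k' => List.replicate ((l.filter (fun x => ¬ decide (x = k))).count k') k') := by
      apply List.flatMap_congr
      intro k' hk'
      have hne : k' ≠ k := fun h => hk (h ▸ hk')
      rw [List.count_filter (by simp [hne])]
    rw [hrep, hcong]
    have hperm2 : (ks'.flatMap (fun k' => List.replicate ((l.filter (fun x => ¬ decide (x = k))).count k') k')).Perm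
        (l.filter (fun x => ¬ decide (x = k))) := by
      apply ih _ hnd'
      intro x hx
      have hxl : x ∈ l := List.mem_of_mem_filter hx
      have hxk : ¬ x = k := by
        have := List.of_mem_filter hx; simpa using this
      have := hsub x hxl
      simp at this
      rcases this with h | h
      · exact absurd h hxk
      · exact h
    exact (hperm2.append_left _).trans (by simpa using List.filter_append_perm (fun x => decide (x = k)) l)

-- one side of B's construction is a permutation of the corresponding filter of A
theorem pv_side_perm (w other : List Char) :
    (((PySem.Set.ofList w).map (fun k => (k, (w.count k : Int)))).flatMap
        (fun p => if other.contains p.1 = true then [] else List.replicate p.2.toNat p.1)).Perm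
      (w.filter (fun x => decide (x ∉ other))) := by
  rw [List.flatMap_map]
  show (List.flatMap (fun a => if other.contains a = true then []
        else List.replicate ((List.count a w : Int)).toNat a) (PySem.Set.ofList w)).Perm _
  have hcong : (List.flatMap (fun a => if other.contains a = true then []
        else List.replicate ((List.count a w : Int)).toNat a) (PySem.Set.ofList w))
      = List.flatMap
        (fun k => List.replicate ((w.filter (fun x => decide (x ∉ other))).count k) k) (PySem.Set.ofList w) := by
    apply List.flatMap_congr
    intro k _
    by_cases hk : k ∈ other
    · rw [if_pos (by simpa using hk)]
      rw [List.count_eq_zero.mpr]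
      · simp
      · intro hmem
        have := List.of_mem_filter hmem
        simp at this
        exact this hk
    · rw [if_neg (by simpa using hk)]
      rw [List.count_filter (by simpa using hk)]
      simp
  rw [hcong]
  apply pv_perm_flatMap_replicate
  · exact PySem.Set.nodup_ofList w
  · intro x hx
    exact (PySem.Set.mem_ofList w x).mpr (List.mem_of_mem_filter hx)

-- ===== VERDICT (by name: the statement is the Claim_ definition above) =====
theorem get_distinct_letters_spec : Claim_equal_get_distinct_letters := by
  intro word1 word2 _
  show get_distinct_letters word1 word2 = get_distinct_letters_alt word1 word2
  simp only [get_distinct_letters, get_distinct_letters_alt]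
  rw [← PySem.Dict.counter_eq_foldl, ← PySem.Dict.counter_eq_foldl,
      PySem.Dict.items_counter, PySem.Dict.items_counter,
      pv_foldl_filter, pv_foldl_filter, pv_foldl_blocks, pv_foldl_blocks]
  apply congrArg
  apply PySem.List.sorted_eq_sorted_of_perm _ _ _ (fun a b h => h)
  simp only [List.nil_append, PySem.Dict.contains_counter]
  have h1 : word1.toList.filter
        (fun x => decide (PySem.Str.len (PySem.Str.replace word2 (String.singleton x) "") = PySem.Str.len word2))
      = word1.toList.filter (fun x => decide (x ∉ word2.toList)) := by
    apply List.filter_congr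
    intro x _
    exact pv_cond_str word2 x
  have h2 : word2.toList.filter
        (fun x => decide (PySem.Str.len (PySem.Str.replace word1 (String.singleton x) "") = PySem.Str.len word1))
      = word2.toList.filter (fun x => decide (x ∉ word1.toList)) := by
    apply List.filter_congr
    intro x _
    exact pv_cond_str word1 x
  rw [h1, h2]
  exact ((pv_side_perm word1.toList word2.toList).append (pv_side_perm word2.toList word1.toList)).symm
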